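-- pv_equiv track=rewrite | github.com/Eddy-Hipo/ejercicios-bigdataca-emagic-hipo-eddy | Ejercicio1/python/ejercicio1.py | subWordMostLArge
-- ===== SOURCE A (Python) =====
-- def subWordMostLArge(subwords):
--     arrayList = []
--     subNum = []
--     for i in range(len(subwords)):
--         subNum.append(len(subwords[i]))
--     numMax = subNum[0]
--     for j in range(len(subNum)):
--         if (subNum[j] >= numMax):
--             numMax = subNum[j]
--     for k in range(len(subNum)):
--         if (subNum[k] == numMax):
--             arrayList.append(subwords[k])
--     return arrayList
-- ===== SOURCE B (Python) =====
-- def subWordMostLArge(subwords):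
--     best = -1
--     result = []
--     for w in subwords:
--         n = len(w)
--         if n > best:
--             best = n
--             result = [w]
--         elif n == best:
--             result.append(w)
--     return result
-- ===== Notes on version B (the rewrite author's own statement) =====
-- stated objective: simpler
-- what changed: Replaced A's three sequential passes (build a length list, scan for the max, filter by index) with a single online pass keeping the best length and the list of words achieving it, resetting the list on strict improvement.
import Mathlib
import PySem

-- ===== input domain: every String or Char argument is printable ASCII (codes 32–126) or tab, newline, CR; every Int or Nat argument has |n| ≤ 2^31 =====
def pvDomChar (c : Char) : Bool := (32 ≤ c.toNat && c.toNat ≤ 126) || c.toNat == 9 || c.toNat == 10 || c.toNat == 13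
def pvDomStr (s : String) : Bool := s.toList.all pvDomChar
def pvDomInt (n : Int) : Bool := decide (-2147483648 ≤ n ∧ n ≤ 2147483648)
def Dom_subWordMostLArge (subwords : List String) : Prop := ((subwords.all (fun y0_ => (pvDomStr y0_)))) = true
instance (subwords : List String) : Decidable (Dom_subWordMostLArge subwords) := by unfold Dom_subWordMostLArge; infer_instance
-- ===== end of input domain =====

-- B replaces A's three passes (length list, max scan, index filter) with one online pass; equal results on nonempty input, and B returns [] where A raises IndexError.

-- ===== PORT A =====
def subWordMostLArge (subwords : List String) : List String :=
  let subNum : List Int := subwords.foldl (fun acc w => acc ++ [PySem.Str.len w]) []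
  match PySem.List.pyGet? subNum 0 with
  | none => []   -- subNum[0] raises IndexError here; excluded by Pre_
  | some n0 =>
    let numMax := subNum.foldl (fun numMax x => if x ≥ numMax then x else numMax) n0
    -- 'for k in range(len(subNum))' reading subwords[k] and subNum[k] in parallel
    (subwords.zip subNum).foldl (fun acc p => if p.2 == numMax then acc ++ [p.1] else acc) []

-- ===== PORT B =====
def altStep (st : Int × List String) (w : String) : Int × List String :=
  let n := PySem.Str.len w
  if n > st.1 then (n, [w])
  else if n == st.1 then (st.1, st.2 ++ [w])
  else st

def subWordMostLArge_alt (subwords : List String) : List String :=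
  (subwords.foldl altStep (-1, [])).2

-- ===== PRECONDITION & SPEC =====
-- Pre_ excludes only the empty list, on which Python A raises IndexError (subNum[0]).
def Pre_subWordMostLArge (subwords : List String) : Prop := subwords ≠ []
instance (subwords : List String) : Decidable (Pre_subWordMostLArge subwords) := by unfold Pre_subWordMostLArge; infer_instance
def pvWitness_subWordMostLArge : List String := (["ab", "c", "de"])

def Spec_subWordMostLArge (subwords : List String) (out : List String) : Prop := out = subWordMostLArge_alt subwords
instance (subwords : List String) (out : List String) : Decidable (Spec_subWordMostLArge subwords out) := by unfold Spec_subWordMostLArge; infer_instance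

-- ===== CLAIM (what is proved, stated in full; the proofs are below) =====
def Claim_equal_subWordMostLArge : Prop := ∀ (subwords : List String), Dom_subWordMostLArge subwords → Pre_subWordMostLArge subwords → Spec_subWordMostLArge subwords (subWordMostLArge subwords)

-- ===== LEMMAS AND PROOFS =====

-- 'if x >= m then x else m' is max
theorem ite_ge_eq_max (m x : Int) : (if x ≥ m then x else m) = max m x := by
  rw [max_def]

-- B's fold characterised: running max plus the filtered list, with a reset iff the max strictly improves
theorem altStep_fold (ws : List String) (m : Int) (r : List String) :
    ws.foldl altStep (m, r)
      = (ws.foldl (fun a w => max a (PySem.Str.len w)) m,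
         (if m < ws.foldl (fun a w => max a (PySem.Str.len w)) m then [] else r)
           ++ ws.filter (fun w => PySem.Str.len w == ws.foldl (fun a w => max a (PySem.Str.len w)) m)) := by
  induction ws generalizing m r with
  | nil => simp
  | cons w t ih =>
    simp only [List.foldl_cons, altStep, List.filter_cons]
    by_cases h1 : PySem.Str.len w > (m, r).1
    · rw [if_pos h1]
      have hmn : max m (PySem.Str.len w) = PySem.Str.len w := by
        simp only at h1; omega
      simp only [hmn]
      rw [ih]
      have hM := (PySem.List.le_foldl_max_int t (fun w => PySem.Str.len w) (PySem.Str.len w)).1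
      have hmlt : m < t.foldl (fun a w => max a (PySem.Str.len w)) (PySem.Str.len w) := by
        simp only at h1 ⊢; omega
      rw [if_pos hmlt]
      by_cases heq : PySem.Str.len w = t.foldl (fun a w => max a (PySem.Str.len w)) (PySem.Str.len w)
      · rw [if_neg (by omega : ¬ PySem.Str.len w < t.foldl (fun a w => max a (PySem.Str.len w)) (PySem.Str.len w)),
            if_pos (by simpa using heq)]
        simp
      · rw [if_pos (by omega : PySem.Str.len w < t.foldl (fun a w => max a (PySem.Str.len w)) (PySem.Str.len w)),
            if_neg (show ¬ (PySem.Str.len w == t.foldl (fun a w => max a (PySem.Str.len w)) (PySem.Str.len w)) = true by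
              simpa using heq)]
    · rw [if_neg h1]
      have hmn : max m (PySem.Str.len w) = m := by simp only at h1; omega
      have hnot : ¬ PySem.Str.len w > m := by simpa using h1
      simp only [hmn]
      have hM := (PySem.List.le_foldl_max_int t (fun w => PySem.Str.len w) m).1
      by_cases h2 : PySem.Str.len w = m
      · rw [if_pos (show (PySem.Str.len w == (m, r).1) = true by simpa using h2)]
        rw [ih]
        by_cases h3 : m < t.foldl (fun a w => max a (PySem.Str.len w)) m
        · rw [if_pos h3, if_pos h3,
              if_neg (show ¬ (PySem.Str.len w == t.foldl (fun a w => max a (PySem.Str.len w)) m) = true by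
                simp only [beq_iff_eq]; omega)]
        · have hm : m = t.foldl (fun a w => max a (PySem.Str.len w)) m := by omega
          rw [if_neg h3, if_neg h3,
              if_pos (show (PySem.Str.len w == t.foldl (fun a w => max a (PySem.Str.len w)) m) = true by
                simp only [beq_iff_eq]; omega)]
          simp
      · rw [if_neg (show ¬ (PySem.Str.len w == (m, r).1) = true by simpa using h2)]
        rw [ih]
        rw [if_neg (show ¬ (PySem.Str.len w == t.foldl (fun a w => max a (PySem.Str.len w)) m) = true by
              simp only [beq_iff_eq]; omega)]

theorem subWordMostLArge_eq_alt (w : String) (t : List String) :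
    subWordMostLArge (w :: t) = subWordMostLArge_alt (w :: t) := by
  have h0 : (0:Int) ≤ PySem.Str.len w := by simp [PySem.Str.len_eq]
  unfold subWordMostLArge subWordMostLArge_alt
  rw [altStep_fold]
  simp only [PySem.List.foldl_append_singleton_eq_map, List.nil_append, List.map_cons]
  rw [show PySem.List.pyGet? (PySem.Str.len w :: t.map PySem.Str.len) 0 = some (PySem.Str.len w) by
    simp [PySem.List.pyGet?, PySem.List.pyIdx?]]
  have hmax : (PySem.Str.len w :: t.map PySem.Str.len).foldl
        (fun numMax x => if x ≥ numMax then x else numMax) (PySem.Str.len w)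
      = (w :: t).foldl (fun a w => max a (PySem.Str.len w)) (-1) := by
    simp only [List.foldl_cons, List.foldl_map, ite_ge_eq_max, max_self,
      show max (-1 : Int) (PySem.Str.len w) = PySem.Str.len w by omega]
  have hM := (PySem.List.le_foldl_max_int t (fun w => PySem.Str.len w) (PySem.Str.len w)).1
  have hlt : (-1 : Int) < (w :: t).foldl (fun a w => max a (PySem.Str.len w)) (-1) := by
    simp only [List.foldl_cons, show max (-1 : Int) (PySem.Str.len w) = PySem.Str.len w by omega]
    omega
  have hzip : (w :: t).zip (PySem.Str.len w :: t.map PySem.Str.len)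
       = (w :: t).map (fun x => (x, PySem.Str.len x)) := by
    have := @List.zip_map' _ _ _ id PySem.Str.len (w :: t)
    simpa using this
  simp only [hmax, hzip, List.foldl_map,
    PySem.List.foldl_append_if_eq_filter
      (fun x => PySem.Str.len x == (w :: t).foldl (fun a w => max a (PySem.Str.len w)) (-1))]
  rw [if_pos hlt]

-- ===== VERDICT (by name: the statement is the Claim_ definition above) =====
theorem subWordMostLArge_spec : Claim_equal_subWordMostLArge := by
  intro subwords _ hpre
  unfold Spec_subWordMostLArge
  cases subwords with
  | nil => exact absurd rfl hpre
  | cons w t => exact subWordMostLArge_eq_alt w t
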